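-- pv_equiv track=rewrite | github.com/IngrojShrestha/debiasing-via-obfuscation-in-multicommunity-settings | baselines/DiffT_AE.py | get_max_text_length
-- ===== SOURCE A (Python) =====
-- from collections import Counter
--
-- def get_max_text_length(lengths):
--     lengths = sorted(lengths)
--
--     dist = dict(Counter(lengths))
--
--     temp_dist = dict()
--
--     for k, v in dist.items():
--         if v >= 5:
--             temp_dist[k] = v
--
--     return max(list(temp_dist.keys()))
-- ===== SOURCE B (Python) =====
-- def get_max_text_length(lengths):
--     s = sorted(lengths)
--     qualifying = []
--     run_val = None
--     run_len = 0
--     for x in s: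
--         if run_len > 0 and run_val == x:
--             run_len += 1
--         else:
--             run_val = x
--             run_len = 1
--         if run_len == 5:
--             qualifying.append(x)
--     return max(qualifying)
-- ===== Notes on version B (the rewrite author's own statement) =====
-- stated objective: alternative
-- what changed: Replaces Counter + a filtered dict + max over its keys by a single run-length pass over the sorted list (a value is appended once when its run reaches 5) followed by max; the dict machinery disappears.
import Mathlib
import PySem

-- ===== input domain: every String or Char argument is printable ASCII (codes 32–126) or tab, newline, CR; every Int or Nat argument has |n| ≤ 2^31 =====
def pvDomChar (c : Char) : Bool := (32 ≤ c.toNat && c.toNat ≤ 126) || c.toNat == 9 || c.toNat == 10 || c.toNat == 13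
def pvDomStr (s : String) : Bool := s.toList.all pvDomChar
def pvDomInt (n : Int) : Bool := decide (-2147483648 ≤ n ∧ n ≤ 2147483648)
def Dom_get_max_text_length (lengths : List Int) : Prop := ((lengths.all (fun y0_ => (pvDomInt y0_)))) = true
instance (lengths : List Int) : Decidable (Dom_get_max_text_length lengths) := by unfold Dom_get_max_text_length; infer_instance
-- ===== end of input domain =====

-- B replaces Counter + filter-dict + max-of-keys by a single run-length pass over the
-- sorted list (append a value once when its run reaches 5), then max; like A it raises
-- ValueError when no value occurs ≥ 5 times (those inputs are outside Pre_).

-- ===== PORT A =====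
-- max(...) raises ValueError on an empty sequence; the port returns 0 there, and Pre_ excludes those inputs.
def get_max_text_length (lengths : List Int) : Int :=
  let lengths' := PySem.List.sorted lengths id
  let dist := PySem.Dict.counter lengths'
  let temp_dist := dist.items.foldl
    (fun (t : PySem.Dict Int Int) kv => if 5 ≤ kv.2 then t.insert kv.1 kv.2 else t)
    PySem.Dict.empty
  (PySem.List.max? temp_dist.keys id).getD 0

-- ===== PORT B =====
-- one step of B's run-length loop: state = (qualifying, run_val, run_len)
def pvRunStep (st : List Int × Option Int × Int) (x : Int) : List Int × Option Int × Int :=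
  let q := st.1
  let (rv, rl) := if 0 < st.2.2 ∧ st.2.1 = some x then (st.2.1, st.2.2 + 1) else (some x, (1 : Int))
  (if rl = 5 then q ++ [x] else q, rv, rl)

-- max(...) raises ValueError on an empty sequence; the port returns 0 there, and Pre_ excludes those inputs.
def get_max_text_length_alt (lengths : List Int) : Int :=
  let s := PySem.List.sorted lengths id
  let st := s.foldl pvRunStep ([], none, 0)
  (PySem.List.max? st.1 id).getD 0

-- ===== PRECONDITION & SPEC =====
-- Pre_ excludes exactly the inputs with no value occurring at least 5 times, on which
-- both Pythons raise ValueError (max of an empty sequence).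
def Pre_get_max_text_length (lengths : List Int) : Prop :=
  ∃ v ∈ lengths, 5 ≤ lengths.count v
instance (lengths : List Int) : Decidable (Pre_get_max_text_length lengths) := by
  unfold Pre_get_max_text_length; infer_instance
def pvWitness_get_max_text_length : List Int := [2, 2, 2, 2, 2]

def Spec_get_max_text_length (lengths : List Int) (out : Int) : Prop := out = get_max_text_length_alt lengths
instance (lengths : List Int) (out : Int) : Decidable (Spec_get_max_text_length lengths out) := by unfold Spec_get_max_text_length; infer_instance

-- ===== CLAIM (what is proved, stated in full; the proofs are below) =====
def Claim_equal_get_max_text_length : Prop := ∀ (lengths : List Int), Dom_get_max_text_length lengths → Pre_get_max_text_length lengths → Spec_get_max_text_length lengths (get_max_text_length lengths)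

-- ===== LEMMAS AND PROOFS =====

-- membership in A's filtered dict (generalized over the accumulating dict)
theorem pv_contains_foldl_filter (pairs : List (Int × Int)) (d : PySem.Dict Int Int) (v : Int) :
    (pairs.foldl (fun (t : PySem.Dict Int Int) kv => if 5 ≤ kv.2 then t.insert kv.1 kv.2 else t) d).contains v = true ↔
      d.contains v = true ∨ ∃ p ∈ pairs, p.1 = v ∧ 5 ≤ p.2 := by
  induction pairs generalizing d with
  | nil => simp
  | cons p t ih =>
    simp only [List.foldl_cons, ih, List.mem_cons]
    by_cases h5 : 5 ≤ p.2
    · simp only [if_pos h5, PySem.Dict.contains_insert]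
      constructor
      · rintro (h | ⟨q, hq, h1, h2⟩)
        · rcases Bool.or_eq_true_iff.mp h with h | h
          · exact .inr ⟨p, .inl rfl, (beq_iff_eq.mp h).symm, h5⟩
          · exact .inl h
        · exact .inr ⟨q, .inr hq, h1, h2⟩
      · rintro (h | ⟨q, hq | hq, h1, h2⟩)
        · exact .inl (Bool.or_eq_true_iff.mpr (.inr h))
        · subst hq; exact .inl (Bool.or_eq_true_iff.mpr (.inl (by simp [h1])))
        · exact .inr ⟨q, hq, h1, h2⟩
    · simp only [if_neg h5]
      constructor
      · rintro (h | ⟨q, hq, h1, h2⟩)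
        · exact .inl h
        · exact .inr ⟨q, .inr hq, h1, h2⟩
      · rintro (h | ⟨q, hq | hq, h1, h2⟩)
        · exact .inl h
        · subst hq; exact absurd h2 h5
        · exact .inr ⟨q, hq, h1, h2⟩

-- A's keys are exactly the values of s with count ≥ 5
theorem pv_memA (s : List Int) (v : Int) :
    v ∈ (((PySem.Dict.counter s).items.foldl
      (fun (t : PySem.Dict Int Int) kv => if 5 ≤ kv.2 then t.insert kv.1 kv.2 else t)
      PySem.Dict.empty).keys) ↔ v ∈ s ∧ 5 ≤ s.count v := by
  rw [← PySem.Dict.contains_iff_mem_keys, pv_contains_foldl_filter]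
  simp only [PySem.Dict.contains_empty, Bool.false_eq_true, false_or,
    PySem.Dict.items_counter, List.mem_map]
  constructor
  · rintro ⟨p, ⟨k, hk, rfl⟩, rfl, h2⟩
    have h2' : (5 : Int) ≤ (List.count k s : Int) := h2
    exact ⟨(PySem.Set.mem_ofList _ _).mp hk, by exact_mod_cast h2'⟩
  · rintro ⟨hv, hc⟩
    exact ⟨(v, (s.count v : Int)), ⟨v, (PySem.Set.mem_ofList _ _).mpr hv, rfl⟩, rfl,
      show (5 : Int) ≤ (s.count v : Int) from by exact_mod_cast hc⟩

-- invariant of B's run-length loop: processing a sorted tail s whose elements all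
-- dominate the current run value x (run length c > 0)
theorem pv_run_inv (s : List Int) (hs : s.Pairwise (· ≤ ·)) (q : List Int) (x : Int) (c : Int)
    (hc : 0 < c) (hle : ∀ z ∈ s, x ≤ z) :
    ∀ v, v ∈ (s.foldl pvRunStep (q, some x, c)).1 ↔
      v ∈ q ∨ (v ≠ x ∧ 5 ≤ s.count v) ∨ (v = x ∧ c < 5 ∧ 5 ≤ c + (s.count x : Int)) := by
  induction s generalizing q x c with
  | nil =>
    intro v
    simp only [List.foldl_nil, List.count_nil, Nat.cast_zero, add_zero]
    constructor
    · exact .inl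
    · rintro (h | ⟨_, h⟩ | ⟨_, h1, h2⟩)
      · exact h
      · exact absurd h (by omega)
      · exact absurd h2 (by omega)
  | cons y t ih =>
    intro v
    have hyt : ∀ z ∈ t, y ≤ z := fun z hz => List.rel_of_pairwise_cons hs hz
    have ht : t.Pairwise (· ≤ ·) := hs.of_cons
    by_cases hxy : x = y
    · subst hxy
      have hstep : pvRunStep (q, some x, c) x =
          (if c + 1 = 5 then q ++ [x] else q, some x, c + 1) := by
        simp [pvRunStep, hc]
      rw [List.foldl_cons, hstep, ih ht _ x (c + 1) (by omega) hyt v]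
      by_cases hv : v = x
      · subst hv
        have hcv : (v :: t).count v = t.count v + 1 := List.count_cons_self ..
        simp only [ne_eq, not_true_eq_false, false_and, false_or, hcv]
        by_cases h15 : c + 1 = 5
        · simp only [if_pos h15, List.mem_append, List.mem_singleton]
          constructor
          · rintro ((h | _) | _)
            · exact .inl h
            · exact .inr ⟨trivial, by omega, by push_cast; omega⟩
            · exact .inr ⟨trivial, by omega, by push_cast; omega⟩
          · rintro (h | _)
            · exact .inl (.inl h)
            · exact .inl (.inr trivial)
        · simp only [if_neg h15]
          have harith : (c + 1 < 5 ∧ 5 ≤ c + 1 + (t.count v : Int)) ↔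
              (c < 5 ∧ 5 ≤ c + ((t.count v + 1 : Nat) : Int)) := by push_cast; omega
          exact or_congr_right (and_congr_right fun _ => harith)
      · have hcv : (x :: t).count v = t.count v := by
          simp [Ne.symm hv]
        have hq : ∀ w, w ∈ (if c + 1 = 5 then q ++ [x] else q) ↔ (w ∈ q ∨ (w = x ∧ c + 1 = 5)) := by
          intro w; split_ifs with h
          · simp [List.mem_append, h]
          · simp [h]
        rw [hq v, hcv]
        constructor
        · rintro ((h | ⟨h, _⟩) | ⟨h1, h2⟩ | ⟨h1, _, _⟩)
          · exact .inl h
          · exact absurd h hv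
          · exact .inr (.inl ⟨hv, h2⟩)
          · exact absurd h1 hv
        · rintro (h | ⟨_, h2⟩ | ⟨h1, _, _⟩)
          · exact .inl (.inl h)
          · exact .inr (.inl ⟨hv, h2⟩)
          · exact absurd h1 hv
    · -- run resets on y ≠ x; x < y ≤ everything in t, so x never recurs
      have hcond : ¬ (0 < c ∧ (some x : Option Int) = some y) := by
        rintro ⟨_, h⟩; exact hxy (by injection h)
      have hstep : pvRunStep (q, some x, c) y = (q, some y, 1) := by
        norm_num [pvRunStep, hcond, hxy]
      rw [List.foldl_cons, hstep, ih ht q y 1 (by norm_num) hyt v]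
      have hxlt : x < y := lt_of_le_of_ne (hle y List.mem_cons_self) hxy
      have hxnot : (y :: t).count x = 0 := by
        rw [List.count_eq_zero]
        intro hmem
        rcases List.mem_cons.mp hmem with h | h
        · exact absurd h.symm (ne_of_gt hxlt)
        · exact absurd (hyt x h) (not_le.mpr hxlt)
      have hxt : t.count x = 0 := by
        simpa [List.count_cons, Ne.symm hxy] using hxnot
      by_cases hvy : v = y
      · subst hvy
        have hcv : (v :: t).count v = t.count v + 1 := List.count_cons_self ..
        rw [hcv]
        constructor
        · rintro (h | ⟨h, _⟩ | ⟨_, _, h3⟩)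
          · exact .inl h
          · exact absurd rfl h
          · exact .inr (.inl ⟨fun h : v = x => hxy h.symm, by push_cast at h3 ⊢; omega⟩)
        · rintro (h | ⟨_, h2⟩ | ⟨h1, _, h3⟩)
          · exact .inl h
          · exact .inr (.inr ⟨rfl, by norm_num, by push_cast at h2 ⊢; omega⟩)
          · exact absurd (h1 ▸ hxnot : (v :: t).count v = 0) (by omega)
      · have hcv : (y :: t).count v = t.count v := by
          simp [Ne.symm hvy]
        rw [hcv]
        constructor
        · rintro (h | ⟨_, h2⟩ | ⟨h1, _, _⟩)
          · exact .inl h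
          · right; left
            refine ⟨fun hvx => ?_, h2⟩
            rw [hvx, hxt] at h2; omega
          · exact absurd h1 hvy
        · rintro (h | ⟨_, h2⟩ | ⟨h1, _, h3⟩)
          · exact .inl h
          · exact .inr (.inl ⟨hvy, h2⟩)
          · subst h1; rw [hxnot] at h3; push_cast at h3; omega

-- B's qualifying list collects exactly the values of sorted s with count ≥ 5
theorem pv_memB (s : List Int) (hs : s.Pairwise (· ≤ ·)) (v : Int) :
    v ∈ (s.foldl pvRunStep ([], none, 0)).1 ↔ 5 ≤ s.count v := by
  cases s with
  | nil => simp
  | cons h t =>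
    have hht : ∀ z ∈ t, h ≤ z := fun z hz => List.rel_of_pairwise_cons hs hz
    have hstep : pvRunStep ([], none, 0) h = ([], some h, 1) := by
      norm_num [pvRunStep]
    rw [List.foldl_cons, hstep, pv_run_inv t hs.of_cons [] h 1 (by norm_num) hht v]
    simp only [List.not_mem_nil, false_or]
    by_cases hvh : v = h
    · subst hvh
      have hcv : (v :: t).count v = t.count v + 1 := List.count_cons_self ..
      rw [hcv]
      constructor
      · rintro (⟨h1, _⟩ | ⟨_, _, h3⟩)
        · exact absurd rfl h1
        · omega
      · intro h2
        exact .inr ⟨rfl, by norm_num, by omega⟩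
    · have hcv : (h :: t).count v = t.count v := by
        simp [Ne.symm hvh]
      rw [hcv]
      constructor
      · rintro (⟨_, h2⟩ | ⟨h1, _, _⟩)
        · exact h2
        · exact absurd h1 hvh
      · exact fun h2 => .inl ⟨hvh, h2⟩

-- two Int lists with the same members have the same (defaulted) maximum
theorem pv_max_eq (KA KB : List Int) (hmem : ∀ v, v ∈ KA ↔ v ∈ KB) :
    (PySem.List.max? KA id).getD 0 = (PySem.List.max? KB id).getD 0 := by
  cases hA : PySem.List.max? KA id with
  | none =>
    have hKA : KA = [] := (PySem.List.max?_eq_none_iff _ _).mp hA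
    subst hKA
    have hKB : KB = [] := by
      cases hKB : KB with
      | nil => rfl
      | cons b bs => exact absurd ((hmem b).mpr (hKB ▸ List.mem_cons_self)) List.not_mem_nil
    simp [hKB, hA]
  | some a =>
    cases hB : PySem.List.max? KB id with
    | none =>
      have hKB : KB = [] := (PySem.List.max?_eq_none_iff _ _).mp hB
      have := (hmem a).mp (PySem.List.max?_mem hA)
      rw [hKB] at this
      exact absurd this List.not_mem_nil
    | some b =>
      have hab : a ≤ b := PySem.List.max?_isMax hB a ((hmem a).mp (PySem.List.max?_mem hA))
      have hba : b ≤ a := PySem.List.max?_isMax hA b ((hmem b).mpr (PySem.List.max?_mem hB))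
      simp [le_antisymm hab hba]

-- ===== VERDICT (by name: the statement is the Claim_ definition above) =====
theorem get_max_text_length_spec : Claim_equal_get_max_text_length := by
  intro lengths _ _
  unfold Spec_get_max_text_length get_max_text_length get_max_text_length_alt
  apply pv_max_eq
  intro v
  rw [pv_memA, pv_memB _ (by simpa using PySem.List.sorted_pairwise lengths id) v]
  constructor
  · exact fun h => h.2
  · exact fun h => ⟨List.count_pos_iff.mp (by omega), h⟩
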